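-- pv_equiv track=rewrite | github.com/ivost/python | LeetCode/contest-112.py | countSameRowCol
-- ===== SOURCE A (Python) =====
-- def countSameRowCol(stone, stones):
--     c = 0
--     for s in stones:
--         if s == stone:
--             continue
--         if s[0] == stone[0]:
--             c += 1
--         if s[1] == stone[1]:
--             c += 1
--     return c
-- ===== SOURCE B (Python) =====
-- def countSameRowCol(stone, stones):
--     row = sum(1 for s in stones if s[0] == stone[0])
--     col = sum(1 for s in stones if s[1] == stone[1])
--     self_count = sum(1 for s in stones if s == stone)
--     return row + col - 2 * self_count
-- ===== Notes on version B (the rewrite author's own statement) =====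
-- stated objective: alternative
-- what changed: Replaces A's single interleaved skip-and-branch loop with three aggregate tallies (row matches, column matches, exact copies of stone) combined by the closed-form correction row+col-2*self.
import Mathlib
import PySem

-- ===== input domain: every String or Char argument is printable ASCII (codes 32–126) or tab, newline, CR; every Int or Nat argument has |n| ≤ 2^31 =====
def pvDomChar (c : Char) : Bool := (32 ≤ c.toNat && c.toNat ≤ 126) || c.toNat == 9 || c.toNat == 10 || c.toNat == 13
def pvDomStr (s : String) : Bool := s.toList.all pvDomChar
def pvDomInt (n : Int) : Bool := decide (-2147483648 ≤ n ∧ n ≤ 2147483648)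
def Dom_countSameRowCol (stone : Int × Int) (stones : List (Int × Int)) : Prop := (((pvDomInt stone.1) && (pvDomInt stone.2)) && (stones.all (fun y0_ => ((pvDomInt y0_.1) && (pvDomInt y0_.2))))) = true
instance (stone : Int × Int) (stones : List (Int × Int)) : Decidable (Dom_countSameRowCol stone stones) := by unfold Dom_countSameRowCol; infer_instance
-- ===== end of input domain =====

-- B replaces A's interleaved skip-and-branch pass by three aggregate tallies (row, col, exact copies) combined as row+col-2*self; alternative decomposition, same O(n) cost.


-- ===== PORT A =====
-- Transliteration of A: one pass; skip the stone itself, add 1 per matching row / column.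
def countSameRowCol (stone : Int × Int) (stones : List (Int × Int)) : Int :=
  stones.foldl
    (fun c s =>
      if s = stone then c
      else
        let c := if s.1 = stone.1 then c + 1 else c
        if s.2 = stone.2 then c + 1 else c)
    0

-- ===== PORT B =====
-- Transliteration of B: three aggregate tallies combined by a closed-form correction.
def countSameRowCol_alt (stone : Int × Int) (stones : List (Int × Int)) : Int :=
  let row : Int := (stones.countP (fun s => s.1 == stone.1) : Nat)
  let col : Int := (stones.countP (fun s => s.2 == stone.2) : Nat)
  let selfCount : Int := (stones.countP (fun s => s == stone) : Nat)
  row + col - 2 * selfCount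

-- ===== PRECONDITION & SPEC =====
def Spec_countSameRowCol (stone : Int × Int) (stones : List (Int × Int)) (out : Int) : Prop := out = countSameRowCol_alt stone stones
instance (stone : Int × Int) (stones : List (Int × Int)) (out : Int) : Decidable (Spec_countSameRowCol stone stones out) := by unfold Spec_countSameRowCol; infer_instance

-- ===== CLAIM (what is proved, stated in full; the proofs are below) =====
def Claim_equal_countSameRowCol : Prop := ∀ (stone : Int × Int) (stones : List (Int × Int)), Dom_countSameRowCol stone stones → Spec_countSameRowCol stone stones (countSameRowCol stone stones)

-- ===== LEMMAS AND PROOFS =====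

-- ===== VERDICT (by name: the statement is the Claim_ definition above) =====
lemma countSameRowCol_foldl (stone : Int × Int) (stones : List (Int × Int)) (c : Int) :
    stones.foldl
      (fun c s =>
        if s = stone then c
        else
          let c := if s.1 = stone.1 then c + 1 else c
          if s.2 = stone.2 then c + 1 else c)
      c
    = c + (stones.countP (fun s => s.1 == stone.1) : Nat)
        + (stones.countP (fun s => s.2 == stone.2) : Nat)
        - 2 * (stones.countP (fun s => s == stone) : Nat) := by
  induction stones generalizing c with
  | nil => simp
  | cons hd tl ih =>
    simp only [List.foldl_cons, List.countP_cons, ih]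
    by_cases h : hd = stone
    · subst h
      simp only [beq_self_eq_true, ite_true]
      push_cast
      ring
    · have h1 : (hd == stone) = false := by simp [h]
      by_cases hr : hd.1 = stone.1 <;> by_cases hc : hd.2 = stone.2 <;>
        simp [h, h1, hr, hc] <;> ring

theorem countSameRowCol_spec : Claim_equal_countSameRowCol := by
  intro stone stones _
  unfold Spec_countSameRowCol countSameRowCol countSameRowCol_alt
  rw [countSameRowCol_foldl]
  push_cast
  ring
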